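/- GENERATED by c/gen_decode.py: decode facts of the image, one per distinct instruction byte string. -/
import UserX.DecodeImage

#decode_all Vorbis.Dec
  "0f28c7"  -- movaps xmm0,xmm7
  "0f8451010000"  -- je 113dc1
  "0f84f3000000"  -- je 107745
  "0f887efdffff"  -- js 10dc4d
  "0f8f380c0000"  -- jg 10fafc
  "0fb69b34060000"  -- movzx ebx,BYTE PTR [rbx+0x634]
  "3985b0000000"  -- cmp DWORD PTR [rbp+0xb0],eax
  "410fb60e"  -- movzx ecx,BYTE PTR [r14]
  "413bada0000000"  -- cmp ebp,DWORD PTR [r13+0xa0]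
  "41885e1a"  -- mov BYTE PTR [r14+0x1a],bl
  "418b5604"  -- mov edx,DWORD PTR [r14+0x4]
  "41c78424e806000000000000"  -- mov DWORD PTR [r12+0x6e8],0x0
  "438d2c7f"  -- lea ebp,[r15+r15*2]
  "4439bbe0010000"  -- cmp DWORD PTR [rbx+0x1e0],r15d
  "44896d20"  -- mov DWORD PTR [rbp+0x20],r13d
  "4489f2"  -- mov edx,r14d
  "448ba574ffffff"  -- mov r12d,DWORD PTR [rbp-0x8c]
  "4539af38060000"  -- cmp DWORD PTR [r15+0x638],r13d
  "458b2f"  -- mov r13d,DWORD PTR [r15]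
  "4801ef"  -- add rdi,rbp
  "48636c2460"  -- movsxd rbp,DWORD PTR [rsp+0x60]
  "488345c810"  -- add QWORD PTR [rbp-0x38],0x10
  "48893c2550f01f00"  -- mov QWORD PTR ds:0x1ff050,rdi
  "4889df"  -- mov rdi,rbx
  "488b742420"  -- mov rsi,QWORD PTR [rsp+0x20]
  "488d2c00"  -- lea rbp,[rax+rax*1]
  "488d7b28"  -- lea rdi,[rbx+0x28]
  "488d842490050000"  -- lea rax,[rsp+0x590]
  "488dbbfc060000"  -- lea rdi,[rbx+0x6fc]
  "48beffffffffffff0f00"  -- movabs rsi,0xfffffffffffff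
  "48d1ee"  -- shr rsi,1
  "4963ed"  -- movsxd rbp,r13d
  "4989ff"  -- mov r15,rdi
  "498d7e01"  -- lea rdi,[r14+0x1]
  "49c1e403"  -- shl r12,0x3
  "4a8dbce368040000"  -- lea rdi,[rbx+r12*8+0x468]
  "4c63742430"  -- movsxd r14,DWORD PTR [rsp+0x30]
  "4c89e8"  -- mov rax,r13
  "4c8bb560ffffff"  -- mov r14,QWORD PTR [rbp-0xa0]
  "4d036718"  -- add r12,QWORD PTR [r15+0x18]
  "4d8d6c0520"  -- lea r13,[r13+rax*1+0x20]
  "660f2f05c0dc0100"  -- comisd xmm0,QWORD PTR [rip+0x1dcc0]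
  "66410f7ec6"  -- movd r14d,xmm0
  "66c7030000"  -- mov WORD PTR [rbx],0x0
  "742c"  -- je 113eec
  "7521"  -- jne 10cf7a
  "783e"  -- js 10c8d1
  "7e30"  -- jle 115494
  "807d1900"  -- cmp BYTE PTR [rbp+0x19],0x0
  "83bde806000009"  -- cmp DWORD PTR [rbp+0x6e8],0x9
  "892c24"  -- mov DWORD PTR [rsp],ebp
  "8983e4060000"  -- mov DWORD PTR [rbx+0x6e4],eax
  "8b03"  -- mov eax,DWORD PTR [rbx]
  "8b6bf8"  -- mov ebp,DWORD PTR [rbx-0x8]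
  "8bb568ffffff"  -- mov esi,DWORD PTR [rbp-0x98]
  "ba80000000"  -- mov edx,0x80
  "c1ff05"  -- sar edi,0x5
  "c7830800c00000000000"  -- mov DWORD PTR [rbx+0xc00008],0x0
  "e801a1feff"  -- call 1003c0
  "e80afdffff"  -- call 10cc80
  "e81649ffff"  -- call 100720
  "e81ef4feff"  -- call 103d00
  "e828ffffff"  -- call 10d040
  "e83174ffff"  -- call 103d00
  "e83c2affff"  -- call 100640
  "e847a1feff"  -- call 100640
  "e851f2feff"  -- call 100720
  "e85d8fffff"  -- call 100800
  "e86a92ffff"  -- call 10d100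
  "e875f7feff"  -- call 103d00
  "e88087ffff"  -- call 101780
  "e88cabfeff"  -- call 1003c0
  "e895a9feff"  -- call 100800
  "e89fc4feff"  -- call 1003c0
  "e8aa7cffff"  -- call 10b8e0
  "e8b39efeff"  -- call 100720
  "e8be29ffff"  -- call 100640
  "e8c896ffff"  -- call 100640
  "e8d23cffff"  -- call 100640
  "e8dc21ffff"  -- call 100800
  "e8e646ffff"  -- call 1008e0
  "e8ee26ffff"  -- call 100300
  "e8f8aafeff"  -- call 100800
  "e916ffffff"  -- jmp 113b22
  "e961fdffff"  -- jmp 113b22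
  "e9ae030000"  -- jmp 1147c3
  "eb02"  -- jmp 1022a4
  "eb98"  -- jmp 108341
  "ebf1"  -- jmp 108673
  "f20f590525db0100"  -- mulsd xmm0,QWORD PTR [rip+0x1db25]
  "f20f5e1dbfda0100"  -- divsd xmm3,QWORD PTR [rip+0x1dabf]
  "f30f1055f0"  -- movss xmm2,DWORD PTR [rbp-0x10]
  "f30f107c2428"  -- movss xmm7,DWORD PTR [rsp+0x28]
  "f30f1155b0"  -- movss DWORD PTR [rbp-0x50],xmm2
  "f30f117da8"  -- movss DWORD PTR [rbp-0x58],xmm7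
  "f30f590b"  -- mulss xmm1,DWORD PTR [rbx]
  "f30f5c5de4"  -- subss xmm3,DWORD PTR [rbp-0x1c]
  "f3410f10642404"  -- movss xmm4,DWORD PTR [r12+0x4]
  "f6c207"  -- test dl,0x7
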